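-- pv_equiv track=rewrite | github.com/jzarcoo/Computer-Organization-and-Architecture | digital-logic/Quine_McCluskey.py | agrupar_pesos
-- ===== SOURCE A (Python) =====
-- def peso_hamming(termino):
--     """
--         Calcula el peso de Hamming (número de bits 1) de un término binario.
--
--         Args:
--             termino (str): El termino binario.
--
--         Returns:
--             int: El peso de Hamming.
--     """
--     return termino.count("1")
--
-- def agrupar_pesos(terminos):
--     """
--         Agrupa los términos según su peso de Hamming.
--
--         Args:
--             terminos (list): Una lista de terminos binarios.
--
--         Returns:
--             dict: Un diccionario con los pesos de Hamming de cada termino.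
--     """
--     pesos = {}
--     for tupla in terminos:
--         peso = peso_hamming(tupla[0])
--         if peso not in pesos:
--             pesos[peso] = []
--         pesos[peso].append(tupla)
--     return pesos
-- ===== SOURCE B (Python) =====
-- def peso_hamming(termino):
--     return termino.count("1")
--
-- def agrupar_pesos(terminos):
--     # distinct Hamming weights in first-occurrence order, then one filter pass per weight
--     pesos_distintos = dict.fromkeys(peso_hamming(t[0]) for t in terminos)
--     return {p: [t for t in terminos if peso_hamming(t[0]) == p] for p in pesos_distintos}
-- ===== Notes on version B (the rewrite author's own statement) =====
-- stated objective: alternative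
-- what changed: A builds the groups in one pass by inserting into a dict keyed on the Hamming weight; B first collects the distinct weights in first-occurrence order (dict.fromkeys) and then builds each group with a separate filter pass over the input.
import Mathlib
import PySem

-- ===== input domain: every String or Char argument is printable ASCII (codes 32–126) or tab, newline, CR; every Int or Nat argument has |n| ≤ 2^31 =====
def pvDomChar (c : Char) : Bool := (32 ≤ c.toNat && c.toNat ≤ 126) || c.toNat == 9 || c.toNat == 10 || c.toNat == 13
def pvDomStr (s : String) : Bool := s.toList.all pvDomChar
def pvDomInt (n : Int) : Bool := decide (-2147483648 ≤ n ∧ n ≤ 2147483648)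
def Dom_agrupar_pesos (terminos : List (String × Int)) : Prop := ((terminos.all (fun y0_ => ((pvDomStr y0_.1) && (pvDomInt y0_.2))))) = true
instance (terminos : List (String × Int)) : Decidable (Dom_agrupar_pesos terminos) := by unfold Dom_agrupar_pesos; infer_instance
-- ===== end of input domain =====

-- B replaces A's incremental dict accumulation by deduplicating the Hamming weights first
-- (first-occurrence order) and building each group with one filter pass (objective: alternative).

-- ===== PORT A =====
def pesoHamming (termino : String) : Int := (PySem.Str.count termino "1" : Int)

def agrupar_pesos (terminos : List (String × Int)) : List (Int × List (String × Int)) :=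
  (terminos.foldl
    (fun pesos tupla =>
      let peso := pesoHamming tupla.1
      let pesos := if pesos.contains peso then pesos else pesos.insert peso ([] : List (String × Int))
      pesos.modify peso [] (fun l => l ++ [tupla]))
    PySem.Dict.empty).items

-- ===== PORT B =====
def agrupar_pesos_alt (terminos : List (String × Int)) : List (Int × List (String × Int)) :=
  let pesosDistintos := PySem.List.dedup (terminos.map (fun t => pesoHamming t.1))
  pesosDistintos.map (fun p => (p, terminos.filter (fun t => pesoHamming t.1 == p)))

-- ===== PRECONDITION & SPEC =====
def Spec_agrupar_pesos (terminos : List (String × Int)) (out : List (Int × List (String × Int))) : Prop := out = agrupar_pesos_alt terminos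
instance (terminos : List (String × Int)) (out : List (Int × List (String × Int))) : Decidable (Spec_agrupar_pesos terminos out) := by unfold Spec_agrupar_pesos; infer_instance

-- ===== CLAIM (what is proved, stated in full; the proofs are below) =====
def Claim_equal_agrupar_pesos : Prop := ∀ (terminos : List (String × Int)), Dom_agrupar_pesos terminos → Spec_agrupar_pesos terminos (agrupar_pesos terminos)

-- ===== LEMMAS AND PROOFS =====

-- A's "if absent, insert []; then append" step is exactly `modify` with default [].
theorem step_eq (d : PySem.Dict Int (List (String × Int))) (t : String × Int) :
    (if d.contains (pesoHamming t.1) then d else d.insert (pesoHamming t.1) ([] : List (String × Int))).modify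
      (pesoHamming t.1) [] (fun l => l ++ [t])
    = d.modify (pesoHamming t.1) [] (fun l => l ++ [t]) := by
  by_cases h : d.contains (pesoHamming t.1) = true
  · simp [h]
  · simp only [Bool.not_eq_true] at h
    simp [h, PySem.Dict.modify, PySem.Dict.getD_insert_self, PySem.Dict.insert_insert_self,
      PySem.Dict.getD_of_not_contains d [] h]

theorem agrupar_pesos_eq (terminos : List (String × Int)) :
    agrupar_pesos terminos = agrupar_pesos_alt terminos := by
  unfold agrupar_pesos agrupar_pesos_alt
  have hfold : (terminos.foldl
      (fun pesos tupla =>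
        let peso := pesoHamming tupla.1
        let pesos := if pesos.contains peso then pesos else pesos.insert peso ([] : List (String × Int))
        pesos.modify peso [] (fun l => l ++ [tupla]))
      PySem.Dict.empty)
      = terminos.foldl (fun d t => d.modify (pesoHamming t.1) [] (fun l => l ++ [t])) PySem.Dict.empty := by
    simp only [step_eq]
  rw [hfold]
  set d := terminos.foldl (fun d t => d.modify (pesoHamming t.1) [] (fun l => l ++ [t])) PySem.Dict.empty with hd
  have hkeys : d.keys = PySem.Set.ofList (terminos.map (fun t => pesoHamming t.1)) := by
    rw [hd, PySem.Dict.keys_foldl_modify_key terminos (fun t => pesoHamming t.1) [] (fun _ t => (fun l => l ++ [t]))]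
    exact PySem.Set.update_nil_left _
  have hnodup : d.keys.Nodup := by
    rw [hd]
    exact PySem.Dict.nodup_keys_foldl_modify_key _ _ _ _ _ (by simp)
  have hgetD : ∀ c, d.getD c [] = terminos.filter (fun t => pesoHamming t.1 == c) := by
    intro c
    have hm := List.foldl_map (f := fun t : String × Int => (pesoHamming t.1, t))
      (g := fun (d : PySem.Dict Int (List (String × Int))) (p : Int × (String × Int)) =>
        d.modify p.1 [] (fun l => l ++ [p.2])) (l := terminos) (init := PySem.Dict.empty)
    rw [hd, ← hm, PySem.Dict.getD_foldl_modify_append]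
    simp [List.filter_map, Function.comp_def]
  rw [PySem.Dict.items_eq_map_keys d hnodup [], hkeys, PySem.List.dedup_eq_ofList]
  exact List.map_congr_left (fun k _ => by rw [hgetD k])

-- ===== VERDICT (by name: the statement is the Claim_ definition above) =====
theorem agrupar_pesos_spec : Claim_equal_agrupar_pesos := by
  intro terminos _
  unfold Spec_agrupar_pesos
  exact agrupar_pesos_eq terminos
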